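-- pv_equiv track=rewrite | github.com/bitcoin/bitcoin | test/lint/run-lint-format-strings.py | count_format_specifiers
-- ===== SOURCE A (Python) =====
-- def count_format_specifiers(format_string):
--     """Return the number of format specifiers in string format_string.
--
--     >>> count_format_specifiers("foo bar foo")
--     0
--     >>> count_format_specifiers("foo %d bar foo")
--     1
--     >>> count_format_specifiers("foo %d bar %i foo")
--     2
--     >>> count_format_specifiers("foo %d bar %i foo %% foo")
--     2
--     >>> count_format_specifiers("foo %d bar %i foo %% foo %d foo")
--     3
--     >>> count_format_specifiers("foo %d bar %i foo %% foo %*d foo")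
--     4
--     """
--     assert type(format_string) is str
--     format_string = format_string.replace('%%', 'X')
--     n = 0
--     in_specifier = False
--     for i, char in enumerate(format_string):
--         if char == "%":
--             in_specifier = True
--             n += 1
--         elif char in "aAcdeEfFgGinopsuxX":
--             in_specifier = False
--         elif in_specifier and char == "*":
--             n += 1
--     return n
-- ===== SOURCE B (Python) =====
-- import re
--
--
-- def count_format_specifiers(format_string):
--     """Return the number of format specifiers in string format_string."""
--     assert type(format_string) is str
--     s = format_string.replace('%%', 'X')
--     return s.count('%') + sum(m.count('*') for m in re.findall(r'%[^aAcdeEfFgGinopsuxX]*', s))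
-- ===== Notes on version B (the rewrite author's own statement) =====
-- stated objective: idiomatic
-- what changed: Replaced the explicit in_specifier state machine over enumerate with a find-regions-then-tally decomposition: after the double-percent-to-X step, add str.count of the percent sign to the star characters inside the specifier regions matched by re.findall(r'%[^aAcdeEfFgGinopsuxX]*').
import Mathlib
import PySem

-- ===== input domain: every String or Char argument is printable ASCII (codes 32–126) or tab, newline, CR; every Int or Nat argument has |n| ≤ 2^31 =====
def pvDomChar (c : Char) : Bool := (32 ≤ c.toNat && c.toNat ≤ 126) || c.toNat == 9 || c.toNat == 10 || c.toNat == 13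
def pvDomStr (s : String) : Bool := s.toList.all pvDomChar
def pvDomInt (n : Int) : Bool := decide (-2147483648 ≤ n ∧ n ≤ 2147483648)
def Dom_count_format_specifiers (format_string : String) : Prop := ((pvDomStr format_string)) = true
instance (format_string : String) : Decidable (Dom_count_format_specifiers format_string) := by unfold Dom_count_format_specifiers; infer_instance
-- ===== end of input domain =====

-- B replaces A's in_specifier state machine by a find-regions-then-tally decomposition (count '%' plus '*' inside regex-matched specifier regions); same value everywhere; a timing run measured B faster (C-level str.count/regex scanning vs a Python char loop).

-- the format-specifier terminator character class "aAcdeEfFgGinopsuxX" (shared character-class constant of both programs)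
def pvIsTerm (c : Char) : Bool := "aAcdeEfFgGinopsuxX".toList.contains c

-- ===== PORT A =====
def count_format_specifiers (format_string : String) : Int :=
  let fs := PySem.Str.replace format_string "%%" "X"
  -- for i, char in enumerate(fs): … (i is unused by the Python loop body)
  ((PySem.List.enumerate fs.toList).foldl
    (fun (st : Int × Bool) p =>
      let char := p.2
      if char = '%' then (st.1 + 1, true)
      else if pvIsTerm char then (st.1, false)
      else if st.2 && (char = '*') then (st.1 + 1, st.2)
      else st)
    (0, false)).1

-- ===== PORT B =====
-- hand port of re.findall(r'%[^aAcdeEfFgGinopsuxX]*', s): exact — the regex matches, left to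
-- right and non-overlapping, a '%' followed by the maximal run of non-terminator characters
def pvFindall : List Char → List (List Char)
  | [] => []
  | c :: rest =>
    if c = '%' then
      ('%' :: rest.takeWhile (fun d => !pvIsTerm d)) :: pvFindall (rest.dropWhile (fun d => !pvIsTerm d))
    else pvFindall rest
termination_by l => l.length
decreasing_by
  · exact Nat.lt_succ_of_le (List.length_dropWhile_le _ _)
  · exact Nat.lt_succ_self _

def count_format_specifiers_alt (format_string : String) : Int :=
  let s := PySem.Str.replace format_string "%%" "X"
  (PySem.Str.count s "%" : Int)
    + ((pvFindall s.toList).map (fun m => (PySem.Chars.count m ['*'] : Int))).sum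

-- ===== PRECONDITION & SPEC =====
def Spec_count_format_specifiers (format_string : String) (out : Int) : Prop := out = count_format_specifiers_alt format_string
instance (format_string : String) (out : Int) : Decidable (Spec_count_format_specifiers format_string out) := by unfold Spec_count_format_specifiers; infer_instance

-- ===== CLAIM (what is proved, stated in full; the proofs are below) =====
def Claim_equal_count_format_specifiers : Prop := ∀ (format_string : String), Dom_count_format_specifiers format_string → Spec_count_format_specifiers format_string (count_format_specifiers format_string)

-- ===== LEMMAS AND PROOFS =====

-- PySem.Chars.count with a one-character needle is List.count
theorem pv_count_go_singleton (c : Char) :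
    ∀ (fuel : Nat) (l : List Char) (acc : Nat), l.length ≤ fuel →
      PySem.Chars.count.go [c] fuel l acc = acc + l.count c := by
  intro fuel
  induction fuel with
  | zero =>
    intro l acc h
    have : l = [] := List.eq_nil_of_length_eq_zero (Nat.le_zero.mp h)
    subst this; simp [PySem.Chars.count.go]
  | succ n ih =>
    intro l acc h
    cases l with
    | nil => simp [PySem.Chars.count.go]
    | cons x t =>
      simp only [PySem.Chars.count.go]
      by_cases hx : x = c
      · subst hx
        have hpre : List.isPrefixOf [x] (x :: t) = true := by simp [List.isPrefixOf]
        rw [if_pos hpre]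
        simp only [List.length_cons, List.length_nil, List.drop_succ_cons, List.drop_zero]
        rw [ih t (acc + 1) (Nat.le_of_succ_le_succ h)]
        simp [List.count_cons]
        omega
      · have hpre : List.isPrefixOf [c] (x :: t) = false := by
          simp [List.isPrefixOf, hx]
          exact fun hc => absurd hc.symm hx
        rw [if_neg (by simp [hpre])]
        rw [ih t acc (Nat.le_of_succ_le_succ h)]
        simp [List.count_cons, hx]
  
theorem pv_count_singleton (l : List Char) (c : Char) :
    PySem.Chars.count l [c] = l.count c := by
  have h := pv_count_go_singleton c l.length l 0 (le_refl _)
  simp only [PySem.Chars.count, List.isEmpty_cons, Bool.false_eq_true, if_false]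
  simpa using h

-- total '*' count over the regions
def pvStars (rs : List (List Char)) : Int :=
  (rs.map (fun m => (m.count '*' : Int))).sum

-- B's value of a suffix, as seen from A's state b (in_specifier)
def pvG (cs : List Char) (b : Bool) : Int :=
  (cs.count '%' : Int) +
    (if b then
      ((cs.takeWhile (fun d => !pvIsTerm d)).count '*' : Int)
        + pvStars (pvFindall (cs.dropWhile (fun d => !pvIsTerm d)))
     else pvStars (pvFindall cs))

theorem pv_term_not_pct : pvIsTerm '%' = false := by decide
theorem pv_term_not_star : pvIsTerm '*' = false := by decide

-- the loop invariant: A's fold from state (n, b) returns n + pvG cs b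
theorem pv_loop_eq (cs : List Char) : ∀ (i n : Int) (b : Bool),
    ((PySem.List.enumerate cs i).foldl
      (fun (st : Int × Bool) p =>
        let char := p.2
        if char = '%' then (st.1 + 1, true)
        else if pvIsTerm char then (st.1, false)
        else if st.2 && (char = '*') then (st.1 + 1, st.2)
        else st)
      (n, b)).1 = n + pvG cs b := by
  induction cs with
  | nil => intro i n b; simp [PySem.List.enumerate, pvG, pvStars, pvFindall]
  | cons c rest ih =>
    intro i n b
    rw [PySem.List.enumerate_cons, List.foldl_cons]
    by_cases hc : c = '%'
    · subst hc
      simp only [if_pos rfl]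
      rw [ih]
      have hg : ∀ b', pvG ('%' :: rest) b' = 1 + pvG rest true := by
        intro b'
        cases b' <;>
          simp [pvG, pvStars, pvFindall, List.count_cons, List.takeWhile_cons,
                List.dropWhile_cons, pv_term_not_pct] <;> ring
      rw [hg]; simp; ring
    · by_cases ht : pvIsTerm c = true
      · have hcne : (c = '%') = False := by simp [hc]
        simp only [hcne, if_false, ht, if_true, if_pos]
        rw [ih]
        have hcp : (c == '%') = false := by simp [hc]
        have hcs : c ≠ '*' := by
          intro h; subst h; exact absurd ht (by decide)
        have hg : ∀ b', pvG (c :: rest) b' = pvG rest false := by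
          intro b'
          cases b' <;>
            simp [pvG, pvStars, pvFindall, List.count_cons, hcp, hc,
                  List.takeWhile_cons, List.dropWhile_cons, ht]
        rw [hg]
      · have ht' : pvIsTerm c = false := by simpa using ht
        have hcne : (c = '%') = False := by simp [hc]
        have hcp : (c == '%') = false := by simp [hc]
        simp only [hcne, if_false, ht', Bool.false_eq_true]
        by_cases hb : b = true
        · subst hb
          by_cases hs : c = '*'
          · subst hs
            simp only [if_pos rfl, Bool.true_and, if_pos]
            rw [ih]
            have hg : pvG ('*' :: rest) true = 1 + pvG rest true := by
              simp [pvG, pvStars, List.count_cons, hcp,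
                    List.takeWhile_cons, List.dropWhile_cons, pv_term_not_star]
              ring
            rw [hg]; simp; ring
          · have hsne : (c = '*') = False := by simp [hs]
            simp only [hsne, Bool.true_and, if_false, decide_false]
            rw [ih]
            have hg : pvG (c :: rest) true = pvG rest true := by
              have hss : (c == '*') = false := by simp [hs]
              simp [pvG, pvStars, List.count_cons, hcp, hss,
                    List.takeWhile_cons, List.dropWhile_cons, ht']
            rw [hg]; simp
        · have hb' : b = false := by simpa using hb
          subst hb'
          simp only [Bool.false_and, if_false, Bool.false_eq_true]
          rw [ih]
          have hg : pvG (c :: rest) false = pvG rest false := by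
            simp [pvG, pvStars, pvFindall, List.count_cons, hcp, hc]
          rw [hg]

-- ===== VERDICT (by name: the statement is the Claim_ definition above) =====
theorem count_format_specifiers_spec : Claim_equal_count_format_specifiers := by
  intro s _
  unfold Spec_count_format_specifiers count_format_specifiers count_format_specifiers_alt
  rw [pv_loop_eq]
  simp [pvG, PySem.Str.count, pv_count_singleton, pvStars]
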